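-- pv_equiv track=rewrite | github.com/pypi-data/pypi-mirror-383 | packages/githubauthlib/githubauthlib-2.0.1-py3-none-any.whl/githubauthlib/github_auth.py | _parse_credential_output
-- ===== SOURCE A (Python) =====
-- from typing import Optional
--
-- def _parse_credential_output(output: str) -> Optional[str]:
--     """
--     Parse credential helper output to extract password/token.
--
--     Args:
--         output: Raw output from credential helper
--
--     Returns:
--         Optional[str]: Extracted token or None if not found
--     """
--     if not output:
--         return None
--
--     lines = output.strip().split("\n")
--     for line in lines:
--         if line.startswith("password="):
--             return line.split("=", 1)[1].strip()
--
--     return None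
-- ===== SOURCE B (Python) =====
-- from typing import Optional
--
--
-- def _parse_credential_output(output: str) -> Optional[str]:
--     """Single substring search instead of splitting into lines and looping:
--     bracket the stripped output with newlines, find the first "\npassword="
--     marker, and slice out the rest of that line."""
--     text = "\n" + output.strip() + "\n"
--     i = text.find("\npassword=")
--     if i == -1:
--         return None
--     j = text.index("\n", i + 1)
--     return text[i + 10:j].strip()
-- ===== Notes on version B (the rewrite author's own statement) =====
-- stated objective: alternative
-- what changed: Replaces the split-into-lines loop with a single substring search: bracket the stripped output with newlines, locate the first newline-preceded password marker, and slice out the remainder of that line.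
import Mathlib
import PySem

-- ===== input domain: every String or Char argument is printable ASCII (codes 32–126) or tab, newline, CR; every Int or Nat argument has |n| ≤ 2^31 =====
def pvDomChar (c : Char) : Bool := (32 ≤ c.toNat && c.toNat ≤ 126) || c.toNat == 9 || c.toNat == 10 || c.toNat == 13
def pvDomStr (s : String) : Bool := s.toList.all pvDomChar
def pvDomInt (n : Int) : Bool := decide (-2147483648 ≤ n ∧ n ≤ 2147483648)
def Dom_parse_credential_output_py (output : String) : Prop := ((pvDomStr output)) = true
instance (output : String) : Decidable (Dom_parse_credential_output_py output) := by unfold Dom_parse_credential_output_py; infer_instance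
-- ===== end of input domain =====

-- B replaces A's split-into-lines loop by a single substring search for "\npassword="
-- in the newline-bracketed stripped output (alternative algorithm, similar cost).

-- ===== PORT A =====
-- the 'for line in lines' loop of A
def pvPwLoopA : List (List Char) → Option String
  | [] => none
  | l :: ls =>
    if PySem.Chars.startswith l "password=".toList then
      -- line.split("=", 1)[1].strip(); the [1] index always exists here (a line that
      -- starts with "password=" contains '='), ported as in-range list indexing via getD
      some (String.ofList (PySem.Chars.strip
        (((PySem.Chars.splitMax? l "=".toList 1).getD []).getD 1 [])))
    else pvPwLoopA ls

def parse_credential_output_py (output : String) : Option String :=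
  if output = "" then none
  else
    pvPwLoopA (PySem.Chars.splitOn (PySem.Chars.strip output.toList) "\n".toList)

-- ===== PORT B =====
def parse_credential_output_py_alt (output : String) : Option String :=
  let text : List Char := '\n' :: (PySem.Chars.strip output.toList ++ ['\n'])
  let i := PySem.Chars.find text "\npassword=".toList
  if i = -1 then none
  else
    let j := PySem.Chars.findFrom text "\n".toList (i + 1)
    some (String.ofList (PySem.Chars.strip (PySem.List.slice text (some (i + 10)) (some j))))

-- ===== PRECONDITION & SPEC =====
def Spec_parse_credential_output_py (output : String) (out : Option String) : Prop := out = parse_credential_output_py_alt output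
instance (output : String) (out : Option String) : Decidable (Spec_parse_credential_output_py output out) := by unfold Spec_parse_credential_output_py; infer_instance

-- ===== CLAIM (what is proved, stated in full; the proofs are below) =====
def Claim_equal_parse_credential_output_py : Prop := ∀ (output : String), Dom_parse_credential_output_py output → Spec_parse_credential_output_py output (parse_credential_output_py output)

-- ===== LEMMAS AND PROOFS =====

-- B's core computation on an already-bracketed character list (proof-side helper)
def pvBCore (text : List Char) : Option String :=
  let i := PySem.Chars.find text "\npassword=".toList
  if i = -1 then none
  else
    let j := PySem.Chars.findFrom text "\n".toList (i + 1)
    some (String.ofList (PySem.Chars.strip (PySem.List.slice text (some (i + 10)) (some j))))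

theorem alt_eq_bcore (output : String) :
    parse_credential_output_py_alt output
      = pvBCore ('\n' :: (PySem.Chars.strip output.toList ++ ['\n'])) := rfl

theorem find_eq_of (s sub : List Char) (k : ℕ) (h1 : sub <+: s.drop k)
    (h2 : ∀ i < k, ¬ sub <+: s.drop i) : PySem.Chars.find s sub = k := by
  have hinf : sub <:+: s := h1.isInfix.trans (List.drop_suffix k s).isInfix
  have h0 : 0 ≤ PySem.Chars.find s sub := (PySem.Chars.find_nonneg_iff s sub).mpr hinf
  obtain ⟨ho, hmin⟩ := PySem.Chars.find_spec h0
  rcases lt_trichotomy (PySem.Chars.find s sub).toNat k with h | h | h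
  · exact absurd ho (h2 _ h)
  · omega
  · exact absurd h1 (hmin _ h)

theorem find_shift (a b sub : List Char)
    (h : ∀ k < a.length, ¬ sub <+: (a ++ b).drop k) :
    PySem.Chars.find (a ++ b) sub =
      if PySem.Chars.find b sub = -1 then -1 else (a.length : ℤ) + PySem.Chars.find b sub := by
  have hdrop : ∀ n : ℕ, (a ++ b).drop (a.length + n) = b.drop n := by
    intro n
    rw [List.drop_append]
    simp
  split_ifs with hb
  · rw [PySem.Chars.find_eq_neg_one_iff] at hb ⊢
    intro hinf
    have : ∃ j, sub <+: (a ++ b).drop j :=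
      (PySem.Chars.exists_prefix_drop_iff_isIn sub (a++b)).mpr ((PySem.Chars.isIn_iff_infix _ _).mpr hinf)
    obtain ⟨j, hj⟩ := this
    rcases lt_or_ge j a.length with hj' | hj'
    · exact h j hj' hj
    · apply hb
      have : (a ++ b).drop j = b.drop (j - a.length) := by
        have := hdrop (j - a.length); rwa [Nat.add_sub_cancel' hj'] at this
      rw [this] at hj
      exact hj.isInfix.trans (List.drop_suffix _ b).isInfix
  · have h0 : 0 ≤ PySem.Chars.find b sub := by
      rcases (PySem.Chars.neg_one_le_find b sub).lt_or_eq with h' | h'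
      · omega
      · exact absurd h'.symm hb
    obtain ⟨ho, hmin⟩ := PySem.Chars.find_spec h0
    set n := (PySem.Chars.find b sub).toNat with hn
    have : PySem.Chars.find (a ++ b) sub = ((a.length + n : ℕ) : ℤ) := by
      apply find_eq_of
      · rw [hdrop n]; exact ho
      · intro i hi
        rcases lt_or_ge i a.length with hi' | hi'
        · exact h i hi'
        · have : (a ++ b).drop i = b.drop (i - a.length) := by
            have := hdrop (i - a.length); rwa [Nat.add_sub_cancel' hi'] at this
          rw [this]
          exact hmin _ (by omega)
    rw [this]
    push_cast
    omega

theorem find_newline (l t : List Char) (hnl : '\n' ∉ l) :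
    PySem.Chars.find (l ++ '\n' :: t) ['\n'] = l.length := by
  apply find_eq_of
  · rw [List.drop_append_of_le_length le_rfl]
    simp
  · intro i hi hpre
    have : (l ++ '\n'::t).drop i = l.drop i ++ '\n'::t := List.drop_append_of_le_length (le_of_lt hi)
    rw [this] at hpre
    have hld : l.drop i ≠ [] := by
      intro hemp
      rw [List.drop_eq_nil_iff] at hemp
      omega
    obtain ⟨c, rest, hcr⟩ := List.exists_cons_of_ne_nil hld
    rw [hcr, List.cons_append, List.cons_prefix_cons] at hpre
    apply hnl
    have : c ∈ l.drop i := by rw [hcr]; exact List.mem_cons_self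
    rw [← hpre.1] at this
    exact List.mem_of_mem_drop this

theorem no_pw_prefix (l t : List Char) (hpw : ¬ "password=".toList <+: l) :
    ¬ "password=".toList <+: (l ++ '\n' :: t) := by
  intro hp
  rcases le_or_gt 9 l.length with hl | hl
  · apply hpw
    rw [List.prefix_iff_eq_take] at hp ⊢
    rwa [show ("password=".toList : List Char).length = 9 from by decide,
      List.take_append_of_le_length hl] at hp
  · have hlen : l.length < ("password=".toList : List Char).length := by
      simpa using hl
    have := hp.getElem (i := l.length) hlen
    rw [List.getElem_append_right le_rfl] at this
    simp at this
    have : '\n' ∈ ("password=".toList : List Char) := this ▸ List.getElem_mem hlen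
    revert this; decide

theorem no_occ_early (l t : List Char) (hnl : '\n' ∉ l) (hpw : ¬ "password=".toList <+: l) :
    ∀ k ≤ l.length, ¬ "\npassword=".toList <+: ('\n' :: (l ++ '\n' :: t)).drop k := by
  intro k hk hpre
  rw [show ("\npassword=".toList : List Char) = '\n' :: "password=".toList from by decide] at hpre
  match k with
  | 0 =>
    rw [List.drop_zero, List.cons_prefix_cons] at hpre
    exact no_pw_prefix l t hpw hpre.2
  | j + 1 =>
    have hj : j < l.length := by omega
    rw [List.drop_succ_cons, List.drop_append_of_le_length (le_of_lt hj)] at hpre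
    have hld : l.drop j ≠ [] := by
      intro hemp; rw [List.drop_eq_nil_iff] at hemp; omega
    obtain ⟨c, rest, hcr⟩ := List.exists_cons_of_ne_nil hld
    rw [hcr, List.cons_append, List.cons_prefix_cons] at hpre
    apply hnl
    have hm : c ∈ l.drop j := by rw [hcr]; exact List.mem_cons_self
    rw [← hpre.1] at hm
    exact List.mem_of_mem_drop hm

theorem modifyHead_fun_id {α : Type} (l : List α) : List.modifyHead (fun x => x) l = l := by
  cases l <;> rfl

theorem splitOn_go_spec (c : Char) (l : List Char) : ∀ (fuel : ℕ) (cur : List Char)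
    (acc : List (List Char)), l.length < fuel →
    PySem.Chars.splitOn.go [c] fuel l cur acc
      = acc.reverse ++ (List.splitOn c l).modifyHead (cur.reverse ++ ·) := by
  induction l with
  | nil =>
    intro fuel cur acc hf
    obtain ⟨f, rfl⟩ : ∃ f, fuel = f + 1 := ⟨fuel - 1, by omega⟩
    simp [PySem.Chars.splitOn.go, List.splitOn]
  | cons x rest ih =>
    intro fuel cur acc hf
    obtain ⟨f, rfl⟩ : ∃ f, fuel = f + 1 := ⟨fuel - 1, by omega⟩
    by_cases hx : x = c
    · subst hx
      rw [PySem.Chars.splitOn.go]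
      simp only [List.isPrefixOf, BEq.rfl, Bool.true_and, if_true,
        List.length_singleton, List.drop_one, List.tail_cons]
      rw [ih f [] (cur.reverse :: acc) (by simp at hf; omega)]
      simp [List.splitOn, List.splitOnP_cons, modifyHead_fun_id]
    · rw [PySem.Chars.splitOn.go]
      simp only [List.isPrefixOf, Bool.and_true, beq_iff_eq]
      rw [if_neg (by simpa using Ne.symm hx)]
      rw [ih f (x :: cur) acc (by simp at hf; omega)]
      have hne := List.splitOnP_ne_nil (fun a => a == c) rest
      obtain ⟨hd, tl, hht⟩ := List.exists_cons_of_ne_nil hne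
      simp [List.splitOn, List.splitOnP_cons, hx, hht]

theorem chars_splitOn_eq (s : List Char) (c : Char) :
    PySem.Chars.splitOn s [c] = List.splitOn c s := by
  rw [PySem.Chars.splitOn, splitOn_go_spec c s (s.length + 1) [] [] (by omega)]
  simp [modifyHead_fun_id]

theorem splitOnP_pieces {α : Type} (p : α → Bool) (s : List α) :
    ∀ l ∈ List.splitOnP p s, ∀ x ∈ l, p x = false := by
  induction s with
  | nil => intro l hl x hx; simp [List.splitOnP_nil] at hl; subst hl; simp at hx
  | cons a s ih =>
    intro l hl x hx
    rw [List.splitOnP_cons] at hl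
    by_cases ha : p a
    · rw [if_pos ha] at hl
      rcases List.mem_cons.mp hl with h | h
      · subst h; simp at hx
      · exact ih l h x hx
    · rw [if_neg ha] at hl
      obtain ⟨hd, tl, hht⟩ := List.exists_cons_of_ne_nil (List.splitOnP_ne_nil p s)
      rw [hht] at hl
      simp only [List.modifyHead_cons] at hl
      rcases List.mem_cons.mp hl with h | h
      · subst h
        rcases List.mem_cons.mp hx with h' | h'
        · subst h'; simpa using ha
        · exact ih hd (hht ▸ List.mem_cons_self) x h'
      · exact ih l (hht ▸ List.mem_cons_of_mem _ h) x hx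

theorem splitOn_pieces (c : Char) (s : List Char) :
    ∀ l ∈ List.splitOn c s, c ∉ l := by
  intro l hl hc
  have := splitOnP_pieces (fun a => a == c) s l hl c hc
  simp at this

theorem goM_zero (sep : List Char) (fuel : ℕ) (l cur : List Char) (acc : List (List Char)) :
    PySem.Chars.splitOnMax.go sep fuel 0 l cur acc = ((cur.reverse ++ l) :: acc).reverse := by
  cases fuel with
  | zero => rw [PySem.Chars.splitOnMax.go]
  | succ f =>
    cases l with
    | nil =>
      rw [PySem.Chars.splitOnMax.go]
      · simp
      · omega
    | cons x rest =>
      rw [PySem.Chars.splitOnMax.go]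
      simp

theorem goM_skip (l : List Char) (h : '=' ∉ l) : ∀ (fuel : ℕ) (rest cur : List Char)
    (acc : List (List Char)) (m : ℕ), m ≠ 0 → l.length ≤ fuel →
    PySem.Chars.splitOnMax.go ['='] fuel m (l ++ rest) cur acc
      = PySem.Chars.splitOnMax.go ['='] (fuel - l.length) m rest (l.reverse ++ cur) acc := by
  induction l with
  | nil => intro fuel rest cur acc m hm hf; simp
  | cons x l' ih =>
    intro fuel rest cur acc m hm hf
    have hx : x ≠ '=' := fun e => h (e ▸ List.mem_cons_self)
    obtain ⟨f, rfl⟩ : ∃ f, fuel = f + 1 := ⟨fuel - 1, by simp at hf; omega⟩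
    rw [List.cons_append, PySem.Chars.splitOnMax.go]
    simp only [List.isPrefixOf, Bool.and_true, beq_iff_eq, if_neg hm]
    rw [if_neg (by simp [Ne.symm hx])]
    rw [ih (fun hx' => h (List.mem_cons_of_mem _ hx')) f rest (x :: cur) acc m hm
      (by simp at hf; omega)]
    have : (x :: l').reverse ++ cur = l'.reverse ++ (x :: cur) := by simp
    rw [this]
    congr 1
    simp

theorem goM_match (f m : ℕ) (rest cur : List Char) (acc : List (List Char)) (hm : m ≠ 0) :
    PySem.Chars.splitOnMax.go ['='] (f + 1) m ('=' :: rest) cur acc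
      = PySem.Chars.splitOnMax.go ['='] f (m - 1) rest [] (cur.reverse :: acc) := by
  rw [PySem.Chars.splitOnMax.go]
  simp only [List.isPrefixOf, Bool.and_true, beq_iff_eq, if_neg hm]
  simp

theorem splitMax_pw (r : List Char) :
    PySem.Chars.splitOnMax ("password=".toList ++ r) ['='] 1 = ["password".toList, r] := by
  rw [PySem.Chars.splitOnMax]
  rw [if_neg (by norm_num)]
  have hs : ("password=".toList : List Char) ++ r = "password".toList ++ ('=' :: r) := by
    simp
  rw [hs]
  have hlen : (("password".toList : List Char) ++ '=' :: r).length = 9 + r.length := by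
    simp; omega
  rw [hlen, show Int.toNat 1 = 1 from rfl]
  rw [goM_skip "password".toList (by decide) (9 + r.length + 1) ('=' :: r) [] [] 1 (by omega)
    (by simp; omega)]
  have : 9 + r.length + 1 - ("password".toList : List Char).length = r.length + 2 := by
    simp; omega
  rw [this, goM_match (r.length + 1) 1 r _ _ (by omega)]
  rw [goM_zero]
  simp

theorem bcore_match (l t : List Char) (hnl : '\n' ∉ l) (hpw : "password=".toList <+: l) :
    pvBCore ('\n' :: (l ++ '\n' :: t)) = some (String.ofList (PySem.Chars.strip (l.drop 9))) := by
  obtain ⟨r, rfl⟩ := hpw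
  have hfind : PySem.Chars.find ('\n' :: ("password=".toList ++ r ++ '\n' :: t)) "\npassword=".toList
      = ((0 : ℕ) : ℤ) := by
    apply find_eq_of
    · rw [List.drop_zero,
        show ("\npassword=".toList : List Char) = '\n' :: "password=".toList from by decide,
        List.cons_prefix_cons]
      exact ⟨rfl, (List.prefix_append _ _).trans (List.prefix_append _ _)⟩
    · intro i hi; omega
  have hlen : ('\n' :: ("password=".toList ++ r ++ '\n' :: t)).length = r.length + t.length + 11 := by
    simp; omega
  have hj : PySem.Chars.findFrom ('\n' :: ("password=".toList ++ r ++ '\n' :: t)) "\n".toList (((0:ℕ):ℤ) + 1)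
      = ((r.length + 10 : ℕ) : ℤ) := by
    rw [show (((0:ℕ):ℤ) + 1) = ((1:ℕ) : ℤ) from by norm_num]
    rw [PySem.Chars.findFrom_natCast _ _ 1 (by rw [hlen]; omega)]
    have hdrop : ('\n' :: ("password=".toList ++ r ++ '\n' :: t)).drop 1
        = ("password=".toList ++ r) ++ '\n' :: t := by simp
    rw [hdrop, show ("\n".toList : List Char) = ['\n'] from by decide, find_newline _ _ hnl]
    rw [if_neg (by omega)]
    push_cast
    simp
    omega
  have hslice : PySem.List.slice ('\n' :: ("password=".toList ++ r ++ '\n' :: t))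
      (some (((0:ℕ) : ℤ) + 10)) (some ((r.length + 10 : ℕ) : ℤ)) = r := by
    rw [show (((0:ℕ) : ℤ) + 10) = ((10:ℕ) : ℤ) from by norm_num]
    rw [PySem.List.slice_toNat _ (by omega) (by omega)]
    have h1 : (('\n' :: ("password=".toList ++ r ++ '\n' :: t))).drop 10 = r ++ '\n' :: t := by
      rw [show ('\n' :: ("password=".toList ++ r ++ '\n' :: t))
            = ('\n' :: "password=".toList) ++ (r ++ '\n' :: t) from by simp,
        show (10 : ℕ) = ('\n' :: "password=".toList : List Char).length from by decide]
      exact List.drop_left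
    simp only [Int.toNat_natCast, h1]
    rw [show (r.length + 10) - 10 = r.length from by omega]
    exact List.take_left
  have h9 : ("password=".toList ++ r : List Char).drop 9 = r := by
    rw [show (9 : ℕ) = ("password=".toList : List Char).length from by decide]
    exact List.drop_left
  rw [pvBCore]
  simp only [hfind, hj, hslice]
  rw [if_neg (by norm_num)]
  rw [h9]

theorem singleton_newline_infix (d : List Char) (h : '\n' ∈ d) : ['\n'] <:+: d := by
  obtain ⟨s, t, rfl⟩ := List.append_of_mem h
  exact ⟨s, t, by simp⟩

theorem bcore_shift (l u : List Char) (hnl : '\n' ∉ l) (hpw : ¬ "password=".toList <+: l) :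
    pvBCore ('\n' :: (l ++ '\n' :: (u ++ ['\n']))) = pvBCore ('\n' :: (u ++ ['\n'])) := by
  have hT : ('\n' :: (l ++ '\n' :: (u ++ ['\n'])) : List Char)
      = ('\n' :: l) ++ ('\n' :: (u ++ ['\n'])) := by simp
  have hno : ∀ k < ('\n' :: l : List Char).length,
      ¬ "\npassword=".toList <+: (('\n' :: l) ++ ('\n' :: (u ++ ['\n']))).drop k := by
    intro k hk
    rw [← hT]
    exact no_occ_early l (u ++ ['\n']) hnl hpw k (by simpa using Nat.lt_succ_iff.mp hk)
  have hshift := find_shift ('\n' :: l) ('\n' :: (u ++ ['\n'])) "\npassword=".toList hno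
  rw [pvBCore, pvBCore, hT, hshift]
  set f' := PySem.Chars.find ('\n' :: (u ++ ['\n'])) "\npassword=".toList with hf'
  clear_value f'
  by_cases hneg : f' = -1
  · simp [hneg]
  · have h0 : 0 ≤ f' := by
      have := PySem.Chars.neg_one_le_find ('\n' :: (u ++ ['\n'])) "\npassword=".toList
      rw [← hf'] at this; omega
    obtain ⟨hocc, -⟩ := PySem.Chars.find_spec (s := '\n' :: (u ++ ['\n']))
      (sub := "\npassword=".toList) (by rw [← hf']; exact h0)
    rw [← hf'] at hocc
    set n' := f'.toNat with hn'
    have hfn : f' = (n' : ℤ) := by omega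
    have hlen' : n' + 10 ≤ u.length + 2 := by
      have h1 := hocc.length_le
      rw [List.length_drop] at h1
      simp at h1
      omega
    rw [if_neg hneg]
    -- the first-newline search after the hit is the same on both lists
    have hdrop2 : ∀ m : ℕ, (('\n' :: l) ++ ('\n' :: (u ++ ['\n']))).drop (('\n' :: l : List Char).length + m)
        = ('\n' :: (u ++ ['\n'])).drop m := by
      intro m
      rw [List.drop_append]
      simp
    set F := PySem.Chars.find (('\n' :: (u ++ ['\n'])).drop (n' + 1)) ['\n'] with hFdef
    have hdropu : (('\n' :: (u ++ ['\n'])) : List Char).drop (n' + 1) = u.drop n' ++ ['\n'] := by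
      rw [List.drop_succ_cons, List.drop_append_of_le_length (by omega)]
    have hFne : F ≠ -1 := by
      rw [hFdef, hdropu, Ne, PySem.Chars.find_eq_neg_one_iff]
      intro hcon
      exact hcon (singleton_newline_infix _ (by simp))
    have hF0 : 0 ≤ F := by
      have := PySem.Chars.neg_one_le_find ((('\n' :: (u ++ ['\n'])) : List Char).drop (n' + 1)) ['\n']
      rw [← hFdef] at this; omega
    set m := F.toNat with hm
    have hFm : F = (m : ℤ) := by omega
    have hlenT : (('\n' :: l) ++ ('\n' :: (u ++ ['\n'])) : List Char).length
        = l.length + u.length + 3 := by simp; omega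
    have hlent' : (('\n' :: (u ++ ['\n'])) : List Char).length = u.length + 2 := by simp
    have hdrop3 : ∀ m : ℕ, (('\n' :: l) ++ ('\n' :: (u ++ ['\n']))).drop (l.length + 1 + m)
        = ('\n' :: (u ++ ['\n'])).drop m := by
      intro m
      have := hdrop2 m
      simpa using this
    have hj : PySem.Chars.findFrom (('\n' :: l) ++ ('\n' :: (u ++ ['\n']))) "\n".toList
        ((l.length + 1 : ℤ) + f' + 1) = ((l.length + 1 + (n' + 1) + m : ℕ) : ℤ) := by
      rw [hfn, show ((l.length + 1 : ℤ) + (n' : ℤ) + 1) = ((l.length + 1 + (n' + 1) : ℕ) : ℤ) from by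
        push_cast; ring]
      rw [PySem.Chars.findFrom_natCast _ _ _ (by rw [hlenT]; omega)]
      rw [hdrop3 (n' + 1), show ("\n".toList : List Char) = ['\n'] from by decide, ← hFdef]
      rw [if_neg hFne, hFm]
      push_cast; ring
    have hj' : PySem.Chars.findFrom ('\n' :: (u ++ ['\n'])) "\n".toList (f' + 1)
        = (((n' + 1) + m : ℕ) : ℤ) := by
      rw [hfn, show ((n' : ℤ) + 1) = (((n' + 1) : ℕ) : ℤ) from by push_cast; ring]
      rw [PySem.Chars.findFrom_natCast _ _ _ (by rw [hlent']; omega)]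
      rw [show ("\n".toList : List Char) = ['\n'] from by decide, ← hFdef]
      rw [if_neg hFne, hFm]
      push_cast; ring
    simp only [List.length_cons, Nat.cast_add, Nat.cast_one]
    rw [if_neg (show ¬((l.length : ℤ) + 1 + f' = -1) from by intro hcon; rw [hfn] at hcon; omega), if_neg hneg]
    simp only [hj, hj']
    rw [hfn]
    have hs1 : PySem.List.slice (('\n' :: l) ++ ('\n' :: (u ++ ['\n'])))
        (some ((l.length + 1 : ℤ) + (n' : ℤ) + 10)) (some ((l.length + 1 + (n' + 1) + m : ℕ) : ℤ))
        = PySem.List.slice ('\n' :: (u ++ ['\n'])) (some ((n' : ℤ) + 10)) (some (((n' + 1) + m : ℕ) : ℤ)) := by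
      rw [show ((l.length + 1 : ℤ) + (n' : ℤ) + 10) = ((l.length + 1 + (n' + 10) : ℕ) : ℤ) from by
        push_cast; ring]
      rw [show ((n' : ℤ) + 10) = ((n' + 10 : ℕ) : ℤ) from by push_cast; ring]
      rw [PySem.List.slice_toNat _ (by omega) (by omega), PySem.List.slice_toNat _ (by omega) (by omega)]
      rw [Int.toNat_natCast, Int.toNat_natCast, Int.toNat_natCast, Int.toNat_natCast]
      rw [hdrop3 (n' + 10)]
      congr 1
      omega
    rw [hs1]

theorem bcore_none (l : List Char) (hnl : '\n' ∉ l) (hpw : ¬ "password=".toList <+: l) :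
    pvBCore ('\n' :: (l ++ ['\n'])) = none := by
  have hfind : PySem.Chars.find ('\n' :: (l ++ ['\n'])) "\npassword=".toList = -1 := by
    rw [PySem.Chars.find_eq_neg_one_iff]
    intro hinf
    obtain ⟨j, hj⟩ := (PySem.Chars.exists_prefix_drop_iff_isIn _ _).mpr
      ((PySem.Chars.isIn_iff_infix _ _).mpr hinf)
    rcases le_or_gt j l.length with hle | hgt
    · exact no_occ_early l [] hnl hpw j hle hj
    · have h1 := hj.length_le
      rw [List.length_drop] at h1
      simp at h1
      omega
  rw [pvBCore, hfind]
  simp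

theorem pwLoop_match (l : List Char) (ls : List (List Char)) (hpw : "password=".toList <+: l) :
    pvPwLoopA (l :: ls) = some (String.ofList (PySem.Chars.strip (l.drop 9))) := by
  obtain ⟨r, rfl⟩ := hpw
  rw [pvPwLoopA]
  rw [if_pos ((PySem.Chars.startswith_iff _ _).mpr ⟨r, rfl⟩)]
  rw [PySem.Chars.splitMax?, if_neg (by decide),
    show ("=".toList : List Char) = ['='] from by decide, splitMax_pw]
  simp

theorem pwLoop_skip (l : List Char) (ls : List (List Char)) (hpw : ¬ "password=".toList <+: l) :
    pvPwLoopA (l :: ls) = pvPwLoopA ls := by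
  rw [pvPwLoopA,
    if_neg (show ¬ (PySem.Chars.startswith l "password=".toList = true) from
      fun h => hpw ((PySem.Chars.startswith_iff _ _).mp h))]

theorem main_lemma (L : List (List Char)) (hne : L ≠ []) (hnl : ∀ l ∈ L, '\n' ∉ l) :
    pvBCore ('\n' :: (['\n'].intercalate L ++ ['\n'])) = pvPwLoopA L := by
  induction L with
  | nil => exact absurd rfl hne
  | cons l L' ih =>
    have hnll : '\n' ∉ l := hnl l List.mem_cons_self
    cases L' with
    | nil =>
      rw [show (['\n'].intercalate [l]) = l from by simp [List.intercalate]]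
      by_cases hpw : "password=".toList <+: l
      · rw [show (l ++ ['\n'] : List Char) = l ++ '\n' :: [] from rfl,
          bcore_match l [] hnll hpw]
        exact (pwLoop_match l [] hpw).symm
      · rw [bcore_none l hnll hpw, pwLoop_skip l [] hpw, pvPwLoopA]
    | cons l₂ L'' =>
      have hint : ['\n'].intercalate (l :: l₂ :: L'')
          = l ++ '\n' :: ['\n'].intercalate (l₂ :: L'') := by
        simp [List.intercalate, List.intersperse]
      rw [hint]
      by_cases hpw : "password=".toList <+: l
      · rw [show ((l ++ '\n' :: ['\n'].intercalate (l₂ :: L'')) ++ ['\n'] : List Char)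
            = l ++ '\n' :: (['\n'].intercalate (l₂ :: L'') ++ ['\n']) from by simp,
          bcore_match l _ hnll hpw]
        exact (pwLoop_match l (l₂ :: L'') hpw).symm
      · rw [show ((l ++ '\n' :: ['\n'].intercalate (l₂ :: L'')) ++ ['\n'] : List Char)
            = l ++ '\n' :: (['\n'].intercalate (l₂ :: L'') ++ ['\n']) from by simp,
          bcore_shift l _ hnll hpw,
          ih (by simp) (fun x hx => hnl x (List.mem_cons_of_mem _ hx)),
          pwLoop_skip l (l₂ :: L'') hpw]

-- ===== VERDICT (by name: the statement is the Claim_ definition above) =====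
theorem parse_credential_output_py_spec : Claim_equal_parse_credential_output_py := by
  intro output _
  unfold Spec_parse_credential_output_py
  by_cases h0 : output = ""
  · subst h0
    decide
  · rw [parse_credential_output_py, if_neg h0, alt_eq_bcore]
    rw [show ("\n".toList : List Char) = ['\n'] from by decide,
      chars_splitOn_eq (PySem.Chars.strip output.toList) '\n']
    have hs : ['\n'].intercalate (List.splitOn '\n' (PySem.Chars.strip output.toList))
        = PySem.Chars.strip output.toList := List.intercalate_splitOn _ _
    conv_rhs => rw [← hs]
    exact (main_lemma _ (by unfold List.splitOn; exact List.splitOnP_ne_nil _ _)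
      (splitOn_pieces '\n' _)).symm
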